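-- pv_equiv track=rewrite | github.com/AsherJingkongChen/SomeSource | PythonPractice/p1/getlist.py | getlist
-- ===== SOURCE A (Python) =====
-- def getlist(original_list):
-- 	created_list = []
-- 	bound = len(original_list) // 2 + (len(original_list) & 1)
-- 	while len(original_list) != 0:
-- 		for offset in range(bound):
-- 			created_list.append(original_list[offset])
-- 			del original_list[offset]
-- 		bound = len(original_list) // 2 + (len(original_list) & 1)
-- 	return created_list
-- ===== SOURCE B (Python) =====
-- def getlist(original_list):
--     # Same return value as A; also reproduces A's side effect of emptying the input list.
--     n = len(original_list)
--     result = []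
--     start, step = 0, 2
--     while start < n:
--         for i in range(start, n, step):
--             result.append(original_list[i])
--         start, step = 2 * start + 1, 2 * step
--     original_list.clear()
--     return result
-- ===== Notes on version B (the rewrite author's own statement) =====
-- stated objective: faster
-- what changed: A repeatedly deletes elements from the list in place (each del shifts the tail), recomputing half-sized rounds; B never mutates during traversal and instead emits the same order by arithmetic index runs with a doubling (start, step) schedule, then clears the input once.
import Mathlib
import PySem

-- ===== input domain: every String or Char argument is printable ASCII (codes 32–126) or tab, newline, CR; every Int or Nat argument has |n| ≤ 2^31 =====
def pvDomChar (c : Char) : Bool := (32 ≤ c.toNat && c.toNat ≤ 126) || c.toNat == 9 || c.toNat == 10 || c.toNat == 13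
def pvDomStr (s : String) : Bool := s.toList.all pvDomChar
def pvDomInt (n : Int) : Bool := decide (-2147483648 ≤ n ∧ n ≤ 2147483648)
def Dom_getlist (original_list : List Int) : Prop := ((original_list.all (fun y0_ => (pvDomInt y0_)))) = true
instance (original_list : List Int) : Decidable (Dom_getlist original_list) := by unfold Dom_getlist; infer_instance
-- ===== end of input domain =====

-- B replaces A's quadratic delete-in-place loops by direct arithmetic index runs (start, step
-- doubling); equivalence is about the RETURN value only (both Pythons also leave
-- original_list empty; the ports are pure).

-- ===== PORT A =====
-- inner 'for offset in range(bound): created.append(lst[offset]); del lst[offset]'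
-- (the 'none' branch is Python's IndexError; it is unreachable because offset < bound ≤ len)
def getlistInner (created lst : List Int) (offset bound : Nat) : List Int × List Int :=
  if offset < bound then
    match PySem.List.pyGet? lst (offset : Int) with
    | some x => getlistInner (created ++ [x]) (lst.eraseIdx offset) (offset + 1) bound
    | none => (created, lst)
  else (created, lst)
  termination_by bound - offset

-- outer 'while len(original_list) != 0' with fuel = initial length (each round removes ≥ half)
def getlistOuter (created lst : List Int) (fuel : Nat) : List Int :=
  match fuel with
  | 0 => created
  | fuel' + 1 =>
    if lst.length ≠ 0 then
      getlistOuter (getlistInner created lst 0 (lst.length / 2 + lst.length % 2)).1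
        (getlistInner created lst 0 (lst.length / 2 + lst.length % 2)).2 fuel'
    else created

def getlist (original_list : List Int) : List Int :=
  getlistOuter [] original_list original_list.length

-- ===== PORT B =====
-- 'for i in range(start, n, step)': tp = step - 1 (step in Source B is always ≥ 2)
def getlistAltInner (l : List Int) (i n tp : Nat) : List Int :=
  if i < n then ((PySem.List.pyGet? l (i : Int)).getD 0) :: getlistAltInner l (i + tp + 1) n tp
  else []
  termination_by n - i

-- 'while start < n: … ; start, step = 2*start+1, 2*step'
def getlistAltLoop (l : List Int) (start step n : Nat) (result : List Int) : List Int :=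
  if start < n then
    getlistAltLoop l (2 * start + 1) (2 * step) n (result ++ getlistAltInner l start n (step - 1))
  else result
  termination_by n - start
  decreasing_by omega

def getlist_alt (original_list : List Int) : List Int :=
  getlistAltLoop original_list 0 2 original_list.length []

-- ===== PRECONDITION & SPEC =====
def Spec_getlist (original_list : List Int) (out : List Int) : Prop := out = getlist_alt original_list
instance (original_list : List Int) (out : List Int) : Decidable (Spec_getlist original_list out) := by unfold Spec_getlist; infer_instance

-- ===== CLAIM (what is proved, stated in full; the proofs are below) =====
def Claim_equal_getlist : Prop := ∀ (original_list : List Int), Dom_getlist original_list → Spec_getlist original_list (getlist original_list)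

-- ===== LEMMAS AND PROOFS =====

-- evens and odds of a list (the mathematical spec both ports are reduced to)
def pvE : List Int → List Int
  | [] => []
  | [x] => [x]
  | x :: _ :: r => x :: pvE r

def pvO : List Int → List Int
  | [] => []
  | [_] => []
  | _ :: y :: r => y :: pvO r

theorem pvO_length (l : List Int) : (pvO l).length = l.length / 2 := by
  induction l using pvO.induct <;> simp [pvO, *] <;> omega

def pvInterleave (l : List Int) : List Int :=
  if l = [] then [] else pvE l ++ pvInterleave (pvO l)
  termination_by l.length
  decreasing_by
    have h1 := pvO_length l
    have h2 : l.length ≠ 0 := by simpa [List.length_eq_zero_iff] using ‹l ≠ []›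
    omega

-- ---- A-side ----
theorem getlistInner_eq (rest : List Int) :
    ∀ (pre created : List Int),
      getlistInner created (pre ++ rest) pre.length (pre.length + (rest.length + 1) / 2)
        = (created ++ pvE rest, pre ++ pvO rest) := by
  induction rest using pvE.induct with
  | case1 =>
    intro pre created
    unfold getlistInner
    simp [pvE, pvO]
  | case2 x =>
    intro pre created
    unfold getlistInner
    rw [if_pos (by simp)]
    simp only [PySem.List.pyGet?_append_length]
    rw [List.eraseIdx_append_of_length_le (by omega), Nat.sub_self, List.eraseIdx_zero,
        List.tail_cons, List.append_nil]
    unfold getlistInner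
    rw [if_neg (by simp)]
    simp [pvE, pvO]
  | case3 x y r ih =>
    intro pre created
    unfold getlistInner
    rw [if_pos (by simp)]
    simp only [PySem.List.pyGet?_append_length]
    rw [List.eraseIdx_append_of_length_le (by omega), Nat.sub_self, List.eraseIdx_zero,
        List.tail_cons]
    have h1 : pre ++ y :: r = (pre ++ [y]) ++ r := by simp
    have h2 : pre.length + 1 = (pre ++ [y]).length := by simp
    have h3 : pre.length + ((x :: y :: r).length + 1) / 2
        = (pre ++ [y]).length + (r.length + 1) / 2 := by simp <;> omega
    rw [h1, h2, h3, ih (pre ++ [y]) (created ++ [x])]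
    simp [pvE, pvO]

theorem getlistOuter_eq :
    ∀ (fuel : Nat) (lst created : List Int), lst.length ≤ fuel →
      getlistOuter created lst fuel = created ++ pvInterleave lst := by
  intro fuel
  induction fuel with
  | zero =>
    intro lst created h
    have hnil : lst = [] := List.length_eq_zero_iff.mp (by omega)
    subst hnil
    simp [getlistOuter, pvInterleave]
  | succ fuel ih =>
    intro lst created h
    cases lst with
    | nil => simp [getlistOuter, pvInterleave]
    | cons a t =>
      unfold getlistOuter
      rw [if_pos (by simp)]
      have hb : (a :: t).length / 2 + (a :: t).length % 2 = ((a :: t).length + 1) / 2 := by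
        simp; omega
      have hin := getlistInner_eq (a :: t) [] created
      simp only [List.nil_append, List.length_nil, Nat.zero_add] at hin
      rw [hb, hin]
      have hlen : (pvO (a :: t)).length ≤ fuel := by
        have := pvO_length (a :: t)
        simp at h this ⊢
        omega
      have hI : pvInterleave (a :: t) = pvE (a :: t) ++ pvInterleave (pvO (a :: t)) := by
        rw [pvInterleave]
        simp
      rw [ih _ _ hlen, hI]
      simp

-- ---- B-side ----
theorem getlistAltInner_get (l : List Int) (tp : Nat) :
    ∀ (i : Nat) (j : Nat),
      (getlistAltInner l i l.length tp)[j]? = l[i + j * (tp + 1)]? := by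
  intro i
  induction i using getlistAltInner.induct (n := l.length) (tp := tp) with
  | case1 i hi ih =>
    intro j
    unfold getlistAltInner
    rw [if_pos hi]
    cases j with
    | zero =>
      have hs : l[i]?.isSome := by simp [hi]
      obtain ⟨v, hv⟩ := Option.isSome_iff_exists.mp hs
      simp [PySem.List.pyGet?_natCast, hv]
    | succ j =>
      simp only [List.getElem?_cons_succ]
      rw [ih j]
      congr 1
      ring
  | case2 i hi =>
    intro j
    unfold getlistAltInner
    rw [if_neg hi]
    have hle : l.length ≤ i + j * (tp + 1) := by omega
    simp [List.getElem?_eq_none hle]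

theorem getlistAltInner_nil (l : List Int) (i tp : Nat) (h : ¬ i < l.length) :
    getlistAltInner l i l.length tp = [] := by
  unfold getlistAltInner
  rw [if_neg h]

theorem pvE_get (m : List Int) : ∀ j, (pvE m)[j]? = m[2 * j]? := by
  induction m using pvE.induct with
  | case1 => simp [pvE]
  | case2 x =>
    intro j
    cases j with
    | zero => simp [pvE]
    | succ j =>
      simp [pvE]
      try omega
  | case3 x y r ih =>
    intro j
    cases j with
    | zero => simp [pvE]
    | succ j =>
      have h2 : 2 * (j + 1) = (2 * j) + 1 + 1 := by ring
      simp only [pvE, List.getElem?_cons_succ, h2]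
      exact ih j

theorem pvO_get (m : List Int) : ∀ j, (pvO m)[j]? = m[2 * j + 1]? := by
  induction m using pvO.induct with
  | case1 => simp [pvO]
  | case2 x =>
    intro j
    simp [pvO]
    try omega
  | case3 x y r ih =>
    intro j
    cases j with
    | zero => simp [pvO]
    | succ j =>
      have h2 : 2 * (j + 1) + 1 = (2 * j + 1) + 1 + 1 := by ring
      simp only [pvO, List.getElem?_cons_succ, h2]
      exact ih j

-- round (s, step = 2s+2): emitted = evens of the residual, next residual = odds of it
theorem pvE_residual (l : List Int) (s : Nat) :
    pvE (getlistAltInner l s l.length s) = getlistAltInner l s l.length (2 * s + 1) := by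
  apply List.ext_getElem?
  intro j
  rw [pvE_get, getlistAltInner_get, getlistAltInner_get]
  congr 1
  ring

theorem pvO_residual (l : List Int) (s : Nat) :
    pvO (getlistAltInner l s l.length s) = getlistAltInner l (2 * s + 1) l.length (2 * s + 1) := by
  apply List.ext_getElem?
  intro j
  rw [pvO_get, getlistAltInner_get, getlistAltInner_get]
  congr 1
  ring

theorem getlistAltLoop_eq (l : List Int) :
    ∀ (k s : Nat) (acc : List Int), l.length - s = k →
      getlistAltLoop l s (2 * s + 2) l.length acc
        = acc ++ pvInterleave (getlistAltInner l s l.length s) := by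
  intro k
  induction k using Nat.strong_induction_on with
  | _ k ih =>
    intro s acc hk
    by_cases hs : s < l.length
    · unfold getlistAltLoop
      rw [if_pos hs]
      have hstep : 2 * s + 2 - 1 = 2 * s + 1 := by omega
      have hstep2 : 2 * (2 * s + 2) = 2 * (2 * s + 1) + 2 := by ring
      rw [hstep, hstep2,
        ih (l.length - (2 * s + 1)) (by omega) (2 * s + 1) _ rfl]
      have hne : getlistAltInner l s l.length s ≠ [] := by
        unfold getlistAltInner
        rw [if_pos hs]
        simp
      have hI : pvInterleave (getlistAltInner l s l.length s)
          = pvE (getlistAltInner l s l.length s)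
            ++ pvInterleave (pvO (getlistAltInner l s l.length s)) := by
        rw [pvInterleave, if_neg hne]
      rw [hI, pvE_residual, pvO_residual]
      simp
    · unfold getlistAltLoop
      rw [if_neg hs]
      rw [getlistAltInner_nil l s s hs]
      simp [pvInterleave]

theorem getlistAltInner_zero (l : List Int) : getlistAltInner l 0 l.length 0 = l := by
  apply List.ext_getElem?
  intro j
  rw [getlistAltInner_get]
  simp

theorem getlist_alt_eq (l : List Int) : getlist_alt l = pvInterleave l := by
  unfold getlist_alt
  have h := getlistAltLoop_eq l (l.length - 0) 0 [] rfl
  simp only [Nat.mul_zero, Nat.zero_add] at h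
  rw [h, getlistAltInner_zero]
  simp

-- ===== VERDICT (by name: the statement is the Claim_ definition above) =====
theorem getlist_spec : Claim_equal_getlist := by
  intro l _
  unfold Spec_getlist
  rw [getlist_alt_eq]
  unfold getlist
  exact getlistOuter_eq l.length l [] (le_refl _)
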